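-- pv_equiv track=rewrite | github.com/shrutiashok7/ap-final-assignment | q13.py | check
-- ===== SOURCE A (Python) =====
-- def check(s, k):
--     if len(s) <= k:
--         return ""
--
--     char_count = [0] * 26
--     for char in s:
--         index = ord(char) - ord('a')
--         char_count[index] += 1
--
--     distinct_chars = 0
--     for count in char_count:
--         if count > 0:
--             distinct_chars += 1
--
--     best_result = ""
--     best_distinct = 0
--
--     for target_count in range(1, len(s) + 1):
--         chars_to_remove = 0
--         possible = True
--         potential_result = [''] * 26
--
--         for i in range(26):
--             if char_count[i] == 0:
--                 continue
--
--             if char_count[i] < target_count: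
--                 possible = False
--                 break
--
--             if char_count[i] > target_count:
--                 chars_to_remove += char_count[i] - target_count
--
--             char = chr(i + ord('a'))
--             potential_result[i] = char * target_count
--
--         if possible and chars_to_remove == k:
--             result_str = ''.join(potential_result)
--             current_distinct = sum(1 for c in potential_result if c)
--
--             if current_distinct > best_distinct:
--                 best_distinct = current_distinct
--                 best_result = result_str
--
--     return best_result
-- ===== SOURCE B (Python) =====
-- def check(s, k):
--     # Closed form: A never drops a character class entirely, so the only viable
--     # per-char target is t = (len(s)-k)/distinct; check divisibility and t <= min count.
--     n = len(s)
--     if n <= k or not s: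
--         return ""
--     counts = {}
--     for ch in s:
--         counts[ch] = counts.get(ch, 0) + 1
--     d = len(counts)
--     t, r = divmod(n - k, d)
--     if r != 0 or t > min(counts.values()):
--         return ""
--     return "".join(ch * t for ch in sorted(counts))
-- ===== Notes on version B (the rewrite author's own statement) =====
-- stated objective: faster
-- what changed: A tries every target count 1..len(s), rescanning the 26-slot count array for each; B computes the single viable target (len(s)-k)/distinct in closed form, checks divisibility and the minimum count, and builds the answer from the sorted distinct characters.
-- outside the precondition, e.g. on check('G', 0): A returns 'a', B returns 'G'
import Mathlib
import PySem

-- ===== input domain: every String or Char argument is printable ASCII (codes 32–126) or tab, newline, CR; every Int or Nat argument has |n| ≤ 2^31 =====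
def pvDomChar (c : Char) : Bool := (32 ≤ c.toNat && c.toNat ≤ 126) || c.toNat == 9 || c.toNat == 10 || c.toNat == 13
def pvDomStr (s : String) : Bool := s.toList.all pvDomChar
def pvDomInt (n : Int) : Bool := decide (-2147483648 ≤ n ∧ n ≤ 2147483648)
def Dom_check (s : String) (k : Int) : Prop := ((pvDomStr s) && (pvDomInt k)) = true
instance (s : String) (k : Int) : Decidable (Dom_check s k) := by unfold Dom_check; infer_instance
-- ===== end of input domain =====

-- B replaces A's scan over every candidate target count 1..len(s) (26 array slots each) by the
-- closed form target = (len(s)-k)/distinct with a divisibility and min-count check (objective: faster).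

-- ===== PORT A =====

-- 'char_count[index] += 1' with Python list-index semantics (a negative index wraps;
-- out of range = IndexError, excluded by Pre_check, where pySetD leaves the list unchanged)
def bumpCount (cc : List Int) (i : Int) : List Int :=
  PySem.List.pySetD cc i (PySem.List.pyGetD cc i 0 + 1)

-- the inner 'for i in range(26)' loop with its break; state (possible, chars_to_remove, potential_result)
def innerLoop (cc : List Int) (t : Int) : List Int → Bool × Int × List String → Bool × Int × List String
  | [], st => st
  | i :: rest, (p, rm, pot) =>
    let c := PySem.List.pyGetD cc i 0
    if c = 0 then innerLoop cc t rest (p, rm, pot)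
    else if c < t then (false, rm, pot)
    else
      let rm' := if t < c then rm + (c - t) else rm
      innerLoop cc t rest
        (p, rm', PySem.List.pySetD pot i (String.ofList (List.replicate t.toNat (Char.ofNat (i + 97).toNat))))

-- one iteration of the outer 'for target_count in range(1, len(s)+1)' loop
def outerStep (cc : List Int) (k : Int) (st : String × Int) (t : Int) : String × Int :=
  match innerLoop cc t (PySem.List.pyRange 0 26 1) (true, 0, List.replicate 26 "") with
  | (possible, rm, pot) =>
    if possible && (rm == k) then
      let resultStr := PySem.Str.join "" pot
      let curDistinct : Int := pot.foldl (fun a c => if c ≠ "" then a + 1 else a) 0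
      if st.2 < curDistinct then (resultStr, curDistinct) else st
    else st

def check (s : String) (k : Int) : String :=
  let cs := s.toList
  if PySem.Str.len s ≤ k then "" else
  let cc := cs.foldl (fun a ch => bumpCount a ((ch.toNat : Int) - 97)) (List.replicate 26 0)
  let _distinct : Int := cc.foldl (fun d c => if 0 < c then d + 1 else d) 0   -- computed by A, never used
  ((PySem.List.pyRange 1 (PySem.Str.len s + 1) 1).foldl (outerStep cc k) ("", 0)).1

-- ===== PORT B =====
def check_alt (s : String) (k : Int) : String :=
  let cs := s.toList
  let n := PySem.Str.len s
  if n ≤ k ∨ cs = [] then "" else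
  let counts := cs.foldl (fun d ch => d.insert ch (d.getD ch 0 + 1)) (PySem.Dict.empty : PySem.Dict Char Int)
  let d : Int := (PySem.Dict.size counts : Int)
  -- divmod(n - k, d): d ≠ 0 on this branch (cs ≠ []), so floordiv/mod are Python-exact here
  let t := PySem.Int.floordiv (n - k) d
  let r := PySem.Int.mod (n - k) d
  -- min(counts.values()): the values list is nonempty here, so the .getD default is never used
  let m := (PySem.List.min? counts.values (fun v => v)).getD 0
  if r ≠ 0 ∨ m < t then "" else
  PySem.Str.join "" ((PySem.List.sorted counts.keys (fun c => c)).map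
    (fun ch => String.ofList (List.replicate t.toNat ch)))

-- ===== PRECONDITION & SPEC =====
-- Pre_check restricts to the function's natural domain — lowercase a-z strings (plus the
-- len(s) <= k early return, which ignores the characters): on any other character A either
-- raises IndexError (codes < 71 or > 122) or, for codes 71-96 ('G'..'`'), Python's
-- negative-index wraparound silently miscounts the character as one of 'a'..'z'.
def Pre_check (s : String) (k : Int) : Prop :=
  PySem.Str.len s ≤ k ∨ s.toList.all (fun c => 97 ≤ c.toNat && c.toNat ≤ 122) = true
instance (s : String) (k : Int) : Decidable (Pre_check s k) := by unfold Pre_check; infer_instance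

def pvWitness_check : String × Int := ("aabbb", 1)

def Spec_check (s : String) (k : Int) (out : String) : Prop := out = check_alt s k
instance (s : String) (k : Int) (out : String) : Decidable (Spec_check s k out) := by unfold Spec_check; infer_instance

-- ===== CLAIM (what is proved, stated in full; the proofs are below) =====
def Claim_equal_check : Prop := ∀ (s : String) (k : Int), Dom_check s k → Pre_check s k → Spec_check s k (check s k)

-- ===== LEMMAS AND PROOFS =====

-- helper definitions and lemmas used only by the proofs
def chrL (i : Nat) : Char := Char.ofNat (97 + i)
def cntf (cs : List Char) (i : Nat) : Int := (cs.count (chrL i) : Int)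
def strf (t : Int) (i : Nat) : String := String.ofList (List.replicate t.toNat (chrL i))

lemma chrL_toNat {j : Nat} (h : j < 26) : (chrL j).toNat = 97 + j := by
  have h2 : 97 + j < 55296 := by omega
  simp [chrL, Char.toNat_ofNat]
  omega

lemma chrL_eq_iff {c : Char} {j : Nat} (hj : j < 26) (h1 : 97 ≤ c.toNat) :
    chrL j = c ↔ j = c.toNat - 97 := by
  constructor
  · rintro rfl; rw [chrL_toNat hj]; omega
  · rintro rfl
    rw [chrL, show 97 + (c.toNat - 97) = c.toNat from by omega, Char.ofNat_toNat]

lemma getD_set_eq {α : Type} (acc : List α) {i j : Nat} (hi : i < acc.length) (hj : j < acc.length) (v d : α) :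
    (acc.set j v).getD i d = if i = j then v else acc.getD i d := by
  rw [List.getD_eq_getElem?_getD, List.getElem?_set]
  by_cases h : j = i
  · subst h; simp [hj]
  · rw [if_neg h, if_neg (fun hh => h hh.symm), List.getD_eq_getElem?_getD]

lemma count_fold_gen (cs : List Char) (h : ∀ c ∈ cs, 97 ≤ c.toNat ∧ c.toNat ≤ 122) :
    ∀ acc : List Int, acc.length = 26 →
      cs.foldl (fun a ch => bumpCount a ((ch.toNat : Int) - 97)) acc
        = (List.range 26).map (fun i => acc.getD i 0 + cntf cs i) := by
  induction cs with
  | nil =>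
    intro acc hlen
    simp only [List.foldl_nil, cntf, List.count_nil]
    refine List.ext_getElem (by simp [hlen]) ?_
    intro i h1 h2
    simp only [List.length_map, List.length_range] at h2
    rw [List.getElem_map, List.getElem_range, List.getD_eq_getElem acc 0 h1]
    push_cast
    ring
  | cons c cs ih =>
    intro acc hlen
    obtain ⟨hc1, hc2⟩ := h c List.mem_cons_self
    have hcs : ∀ x ∈ cs, 97 ≤ x.toNat ∧ x.toNat ≤ 122 := fun x hx => h x (List.mem_cons_of_mem _ hx)
    have hj26 : c.toNat - 97 < 26 := by omega
    have hstep : bumpCount acc ((c.toNat : Int) - 97)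
        = acc.set (c.toNat - 97) (acc.getD (c.toNat - 97) 0 + 1) := by
      rw [show ((c.toNat : Int) - 97) = ((c.toNat - 97 : Nat) : Int) from by omega, bumpCount,
        PySem.List.pySetD_of_nonneg _ _ (by omega)]
      simp [PySem.List.pyGetD_natCast]
    rw [List.foldl_cons, hstep, ih hcs _ (by simp [hlen])]
    refine List.map_congr_left ?_
    intro i hi
    have hi26 : i < 26 := List.mem_range.mp hi
    rw [getD_set_eq acc (by omega) (by omega)]
    have hcount : cntf (c :: cs) i = cntf cs i + (if i = c.toNat - 97 then 1 else 0) := by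
      rw [cntf, cntf, List.count_cons]
      by_cases hij : i = c.toNat - 97
      · have hec : c = chrL i := ((chrL_eq_iff hi26 hc1).mpr hij).symm
        rw [if_pos (by simp [hec]), if_pos hij]; push_cast; ring
      · have hne : ¬ (chrL i = c) := fun hcc => hij ((chrL_eq_iff hi26 hc1).mp hcc)
        rw [if_neg (by simp; exact fun hcc => hne hcc.symm), if_neg hij]; push_cast; ring
    rw [hcount]
    split_ifs with hij
    · subst hij; ring
    · ring

lemma sum_cnt (cs : List Char) (h : ∀ c ∈ cs, 97 ≤ c.toNat ∧ c.toNat ≤ 122) :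
    ((List.range 26).map (cntf cs)).sum = (cs.length : Int) := by
  induction cs with
  | nil =>
    rw [show cntf [] = fun _ => (0:Int) from funext fun i => by simp [cntf]]
    simp
  | cons c cs ih =>
    have hc1 := (h c List.mem_cons_self).1
    have hc2 := (h c List.mem_cons_self).2
    have hcs : ∀ x ∈ cs, 97 ≤ x.toNat ∧ x.toNat ≤ 122 := fun x hx => h x (List.mem_cons_of_mem _ hx)
    have hsplit : ∀ i ∈ List.range 26,
        cntf (c :: cs) i = cntf cs i + (if i = c.toNat - 97 then 1 else 0) := by
      intro i hi
      have hi26 : i < 26 := List.mem_range.mp hi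
      rw [cntf, cntf, List.count_cons]
      by_cases hij : i = c.toNat - 97
      · have hec : c = chrL i := ((chrL_eq_iff hi26 hc1).mpr hij).symm
        rw [if_pos (by simp [hec]), if_pos hij]; push_cast; ring
      · have hne : ¬ (chrL i = c) := fun hcc => hij ((chrL_eq_iff hi26 hc1).mp hcc)
        rw [if_neg (by simp; exact fun hcc => hne hcc.symm), if_neg hij]; push_cast; ring
    rw [List.map_congr_left hsplit]
    have hsum : ((List.range 26).map (fun i => cntf cs i + (if i = c.toNat - 97 then 1 else 0))).sum
        = ((List.range 26).map (cntf cs)).sum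
          + ((List.range 26).map (fun i => if i = c.toNat - 97 then (1 : Int) else 0)).sum := by
      rw [← List.sum_map_add]
    have hind : ((List.range 26).map (fun i => if i = c.toNat - 97 then (1 : Int) else 0)).sum = 1 := by
      rw [show (fun i => if i = c.toNat - 97 then (1 : Int) else 0)
            = (fun i => if (i == c.toNat - 97) = true then (1 : Int) else 0) from funext fun i => by simp,
        PySem.List.sum_map_ite_one_zero,
        show (List.range 26).countP (fun i => i == c.toNat - 97) = (List.range 26).count (c.toNat - 97) from rfl]
      simp [List.count_range, show c.toNat - 97 < 26 from by omega]
    rw [hsum, hind, ih hcs]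
    simp [List.length_cons]


lemma inner_good (cc : List Int) (t : Int) : ∀ (L : List Int) (rm : Int) (pot : List String),
    (∀ i ∈ L, PySem.List.pyGetD cc i 0 ≠ 0 → t ≤ PySem.List.pyGetD cc i 0) →
    innerLoop cc t L (true, rm, pot) =
      (true,
       rm + (L.map (fun i => if PySem.List.pyGetD cc i 0 ≠ 0 then PySem.List.pyGetD cc i 0 - t else 0)).sum,
       L.foldl (fun pt i => if PySem.List.pyGetD cc i 0 ≠ 0
          then PySem.List.pySetD pt i (String.ofList (List.replicate t.toNat (Char.ofNat (i + 97).toNat))) else pt) pot) := by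
  intro L
  induction L with
  | nil => intro rm pot _; simp [innerLoop]
  | cons i rest ih =>
    intro rm pot hgood
    have hi := hgood i List.mem_cons_self
    have hrest : ∀ j ∈ rest, PySem.List.pyGetD cc j 0 ≠ 0 → t ≤ PySem.List.pyGetD cc j 0 :=
      fun j hj => hgood j (List.mem_cons_of_mem _ hj)
    by_cases h0 : PySem.List.pyGetD cc i 0 = 0
    · rw [show innerLoop cc t (i :: rest) (true, rm, pot)
          = innerLoop cc t rest (true, rm, pot) from by simp [innerLoop, h0], ih rm pot hrest]
      simp [h0]
    · have hle : t ≤ PySem.List.pyGetD cc i 0 := hi h0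
      have hnlt : ¬ (PySem.List.pyGetD cc i 0 < t) := by omega
      rw [show innerLoop cc t (i :: rest) (true, rm, pot)
          = innerLoop cc t rest (true, (if t < PySem.List.pyGetD cc i 0 then rm + (PySem.List.pyGetD cc i 0 - t) else rm),
              PySem.List.pySetD pot i (String.ofList (List.replicate t.toNat (Char.ofNat (i + 97).toNat))))
          from by simp [innerLoop, h0, hnlt], ih _ _ hrest]
      simp only [List.map_cons, List.sum_cons, List.foldl_cons, if_pos h0, Prod.mk.injEq]
      refine ⟨by trivial, ?_, by trivial⟩
      by_cases hlt : t < PySem.List.pyGetD cc i 0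
      · rw [if_pos hlt]; ring
      · rw [if_neg hlt]
        have : PySem.List.pyGetD cc i 0 - t = 0 := by omega
        rw [this]; ring

lemma inner_bad (cc : List Int) (t : Int) : ∀ (L : List Int) (rm : Int) (pot : List String),
    (∃ i ∈ L, PySem.List.pyGetD cc i 0 ≠ 0 ∧ PySem.List.pyGetD cc i 0 < t) →
    (innerLoop cc t L (true, rm, pot)).1 = false := by
  intro L
  induction L with
  | nil => rintro rm pot ⟨i, hi, _⟩; simp at hi
  | cons i rest ih =>
    rintro rm pot ⟨j, hj, hj1, hj2⟩
    by_cases h0 : PySem.List.pyGetD cc i 0 = 0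
    · have hjr : j ∈ rest := by
        rcases List.mem_cons.mp hj with rfl | h
        · exact absurd h0 hj1
        · exact h
      rw [show innerLoop cc t (i :: rest) (true, rm, pot)
          = innerLoop cc t rest (true, rm, pot) from by simp [innerLoop, h0]]
      exact ih rm pot ⟨j, hjr, hj1, hj2⟩
    · by_cases hlt : PySem.List.pyGetD cc i 0 < t
      · rw [show innerLoop cc t (i :: rest) (true, rm, pot)
            = (false, rm, pot) from by simp [innerLoop, h0, hlt]]
      · have hjr : j ∈ rest := by
          rcases List.mem_cons.mp hj with rfl | h
          · exact absurd hj2 hlt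
          · exact h
        rw [show innerLoop cc t (i :: rest) (true, rm, pot)
            = innerLoop cc t rest (true, (if t < PySem.List.pyGetD cc i 0 then rm + (PySem.List.pyGetD cc i 0 - t) else rm),
                PySem.List.pySetD pot i (String.ofList (List.replicate t.toNat (Char.ofNat (i + 97).toNat))))
            from by simp [innerLoop, h0, hlt]]
        exact ih _ _ ⟨j, hjr, hj1, hj2⟩

lemma foldl_id {σ α : Type} (f : σ → α → σ) : ∀ (ts : List α) (st : σ),
    (∀ x ∈ ts, f st x = st) → ts.foldl f st = st := by
  intro ts
  induction ts with
  | nil => intro st _; rfl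
  | cons a l ih =>
    intro st h
    rw [List.foldl_cons, h a List.mem_cons_self]
    exact ih st (fun x hx => h x (List.mem_cons_of_mem _ hx))

lemma foldl_single {σ : Type} (f : σ → Int → σ) (t0 : Int) :
    ∀ (ts : List Int) (st : σ), t0 ∈ ts → ts.Nodup →
    (∀ (s' : σ) (t : Int), t ∈ ts → t ≠ t0 → f s' t = s') →
    ts.foldl f st = f st t0 := by
  intro ts
  induction ts with
  | nil => intro st h; simp at h
  | cons a l ih =>
    intro st hmem hnd hid
    rcases List.mem_cons.mp hmem with rfl | hmem'
    · rw [List.foldl_cons]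
      refine foldl_id f l (f st t0) ?_
      intro x hx
      exact hid _ x (List.mem_cons_of_mem _ hx) (fun hxa => (List.nodup_cons.mp hnd).1 (hxa ▸ hx))
    · have ha : a ≠ t0 := fun h => by
        subst h; exact (List.nodup_cons.mp hnd).1 hmem'
      rw [List.foldl_cons, hid st a List.mem_cons_self ha]
      exact ih st hmem' (List.nodup_cons.mp hnd).2
        (fun s' t ht => hid s' t (List.mem_cons_of_mem _ ht))

lemma pot_fold (p : Nat → Bool) (v : Nat → String) :
    ∀ (J : List Nat) (pot : List String), pot.length = 26 → (∀ j ∈ J, j < 26) → J.Nodup →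
    J.foldl (fun pt j => if p j then PySem.List.pySetD pt (j : Int) (v j) else pt) pot
    = (List.range 26).map (fun i => if i ∈ J ∧ p i then v i else pot.getD i "") := by
  intro J
  induction J with
  | nil =>
    intro pot hlen _ _
    refine List.ext_getElem (by simp [hlen]) ?_
    intro i h1 h2
    rw [List.getElem_map, List.getElem_range]
    simp only [List.mem_nil_iff, false_and, if_neg (fun h => h : ¬ False)]
    exact (List.getD_eq_getElem pot "" (by simpa using h1)).symm
  | cons j J ih =>
    intro pot hlen hmem hnd
    have hj26 : j < 26 := hmem j List.mem_cons_self
    have hJ : ∀ x ∈ J, x < 26 := fun x hx => hmem x (List.mem_cons_of_mem _ hx)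
    have hjJ : j ∉ J := (List.nodup_cons.mp hnd).1
    rw [List.foldl_cons]
    by_cases hp : p j
    · have hset : (if p j then PySem.List.pySetD pot (j : Int) (v j) else pot) = pot.set j (v j) := by
        rw [if_pos hp, PySem.List.pySetD_of_nonneg _ _ (by omega)]
        simp
      rw [hset, ih _ (by simp [hlen]) hJ (List.nodup_cons.mp hnd).2]
      refine List.map_congr_left ?_
      intro i hi
      have hi26 : i < 26 := List.mem_range.mp hi
      rw [getD_set_eq pot (by omega) (by omega)]
      by_cases hij : i = j
      · subst hij
        rw [if_neg (fun hcond => hjJ hcond.1), if_pos rfl, if_pos ⟨List.mem_cons_self, hp⟩]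
      · rw [if_neg hij]
        by_cases hcond : i ∈ J ∧ p i = true
        · rw [if_pos hcond, if_pos ⟨List.mem_cons_of_mem _ hcond.1, hcond.2⟩]
        · rw [if_neg hcond, if_neg (fun hc => hcond ⟨(List.mem_cons.mp hc.1).resolve_left hij, hc.2⟩)]
    · rw [if_neg hp, ih _ hlen hJ (List.nodup_cons.mp hnd).2]
      refine List.map_congr_left ?_
      intro i hi
      by_cases hcond : i ∈ J ∧ p i = true
      · rw [if_pos hcond, if_pos ⟨List.mem_cons_of_mem _ hcond.1, hcond.2⟩]
      · rw [if_neg hcond, if_neg ?_]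
        rintro ⟨hmem', hpi⟩
        rcases List.mem_cons.mp hmem' with rfl | h
        · exact hp hpi
        · exact hcond ⟨h, hpi⟩

def ddf (cs : List Char) : Nat := (List.range 26).countP (fun i => !(cntf cs i == 0))
def klist (cs : List Char) : List Nat := (List.range 26).filter (fun i => !(cntf cs i == 0))

lemma ddf_eq_klist_length (cs : List Char) : ddf cs = (klist cs).length := by
  rw [ddf, klist, List.countP_eq_length_filter]

lemma klist_lt (cs : List Char) : ∀ j ∈ klist cs, j < 26 := by
  intro j hj
  exact List.mem_range.mp (List.mem_of_mem_filter hj)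

lemma klist_perm (cs : List Char) (h : ∀ c ∈ cs, 97 ≤ c.toNat ∧ c.toNat ≤ 122) :
    ((klist cs).map chrL).Perm (PySem.Set.ofList cs) := by
  rw [List.perm_ext_iff_of_nodup ?nd1 (PySem.Set.nodup_ofList cs)]
  case nd1 =>
    refine (List.Nodup.filter _ (List.nodup_range)).map_on ?_
    intro a ha b hb hab
    have ha26 := List.mem_range.mp (List.mem_of_mem_filter ha)
    have hb26 := List.mem_range.mp (List.mem_of_mem_filter hb)
    have := congrArg Char.toNat hab
    rw [chrL_toNat ha26, chrL_toNat hb26] at this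
    omega
  intro c
  rw [PySem.Set.mem_ofList, List.mem_map]
  constructor
  · rintro ⟨j, hj, rfl⟩
    have hj26 := klist_lt cs j hj
    have hcnt : ¬ (cntf cs j = 0) := by
      have := List.of_mem_filter hj
      simpa using this
    have : 0 < cs.count (chrL j) := by
      rw [cntf] at hcnt
      omega
    exact List.count_pos_iff.mp this
  · intro hc
    obtain ⟨hc1, hc2⟩ := h c hc
    refine ⟨c.toNat - 97, ?_, (chrL_eq_iff (by omega) hc1).mpr rfl⟩
    rw [klist, List.mem_filter]
    refine ⟨List.mem_range.mpr (by omega), ?_⟩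
    have : 0 < cs.count (chrL (c.toNat - 97)) := by
      rw [(chrL_eq_iff (by omega) hc1).mpr rfl]
      exact List.count_pos_iff.mpr hc
    simp [cntf]
    omega

lemma klist_sorted_chars (cs : List Char) :
    ((klist cs).map chrL).Pairwise (fun a b => a < b) := by
  rw [List.pairwise_map]
  refine List.Pairwise.imp_of_mem ?_ (List.Pairwise.filter _ (List.pairwise_lt_range))
  intro a b ha hb hab
  have ha26 := klist_lt cs a ha
  have hb26 := klist_lt cs b hb
  refine Char.lt_def.mpr (UInt32.lt_iff_toNat_lt.mpr ?_)
  have h1 : (chrL a).toNat = 97 + a := chrL_toNat ha26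
  have h2 : (chrL b).toNat = 97 + b := chrL_toNat hb26
  rw [Char.toNat] at h1 h2
  omega

lemma sorted_keys (cs : List Char) (h : ∀ c ∈ cs, 97 ≤ c.toNat ∧ c.toNat ≤ 122) :
    PySem.List.sorted (PySem.Set.ofList cs) (fun c => c) = (klist cs).map chrL := by
  exact PySem.List.sorted_eq_of_perm_of_pairwise_lt _ _ _ (klist_perm cs h) (klist_sorted_chars cs)


lemma sum_ite_sub (g : Nat → Int) (t : Int) : ∀ L : List Nat,
    (L.map (fun i => if g i ≠ 0 then g i - t else 0)).sum
      = (L.map g).sum - t * (L.countP (fun i => !(g i == 0)) : Int) := by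
  intro L
  induction L with
  | nil => simp
  | cons j L ih =>
    simp only [List.map_cons, List.sum_cons, List.countP_cons, ih]
    by_cases h : g j = 0
    · simp [h]
    · have hb : (!(g j == 0)) = true := by simp [h]
      rw [if_pos h, hb]
      simp only [if_pos trivial]
      push_cast
      ring

lemma join_nil_eq_flatten (parts : List (List Char)) :
    PySem.Chars.join [] parts = parts.flatten := by
  induction parts with
  | nil => rfl
  | cons p ps ih => cases ps with
    | nil => simp [PySem.Chars.join, List.intercalate]
    | cons q qs =>
      simp only [PySem.Chars.join, List.intercalate, List.intersperse] at *
      simp_all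

lemma flatten_map_ite (p : Nat → Bool) (f : Nat → List Char) : ∀ L : List Nat,
    (L.map (fun i => if p i then f i else [])).flatten = ((L.filter p).map f).flatten := by
  intro L
  induction L with
  | nil => rfl
  | cons j L ih =>
    by_cases h : p j
    · simp only [List.map_cons, List.flatten_cons, List.filter_cons, h, if_pos, ih]
    · simp only [List.map_cons, List.flatten_cons, List.filter_cons, h, if_neg,
        Bool.false_eq_true, not_false_iff]
      simpa using ih

lemma ofList_ne_empty {l : List Char} (h : l ≠ []) : String.ofList l ≠ "" := by
  intro hc
  exact h (by simpa using congrArg String.toList hc)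


lemma main_nonempty (s : String) (k : Int)
    (hnk : ¬ PySem.Str.len s ≤ k)
    (hlow : ∀ c ∈ s.toList, 97 ≤ c.toNat ∧ c.toNat ≤ 122)
    (hne : s.toList ≠ []) :
    check s k = check_alt s k := by
  have hn : PySem.Str.len s = (s.toList.length : Int) := by simp [pysem]
  set cs := s.toList with hcs
  set n : Int := (cs.length : Int) with hndef
  -- A's count array
  have hcc : cs.foldl (fun a ch => bumpCount a ((ch.toNat : Int) - 97)) (List.replicate 26 0)
      = (List.range 26).map (cntf cs) := by
    rw [count_fold_gen cs hlow _ (by simp)]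
    refine List.map_congr_left fun i hi => ?_
    have h0 : (List.replicate 26 (0:Int)).getD i 0 = 0 := by
      rw [List.getD_eq_getElem _ _ (by simpa using List.mem_range.mp hi), List.getElem_replicate]
    rw [h0]
    ring
  set cc := (List.range 26).map (cntf cs) with hccdef
  have hg : ∀ j : Nat, j < 26 → PySem.List.pyGetD cc ((j : Int)) 0 = cntf cs j := by
    intro j hj
    rw [PySem.List.pyGetD_natCast, hccdef, PySem.List.getD_map_range _ _ _ _ hj]
  -- B's counter
  have hcounter : cs.foldl (fun d ch => d.insert ch (d.getD ch 0 + 1))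
      (PySem.Dict.empty : PySem.Dict Char Int) = PySem.Dict.counter cs :=
    PySem.Dict.foldl_insert_getD_add_one_eq_counter cs
  set Sfin : List Char := PySem.Set.ofList cs with hSdef
  have hSize : (PySem.Dict.counter cs).size = Sfin.length := by
    show (PySem.Dict.counter cs).items.length = Sfin.length
    rw [PySem.Dict.items_counter, List.length_map]
  have hKeys : (PySem.Dict.counter cs).keys = Sfin := PySem.Dict.keys_counter cs
  have hValues : (PySem.Dict.counter cs).values = Sfin.map (fun c => (cs.count c : Int)) := by
    show (PySem.Dict.counter cs).items.map Prod.snd = _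
    rw [PySem.Dict.items_counter, List.map_map]
    rfl
  have hSne : Sfin ≠ [] := by
    cases hc : cs with
    | nil => exact absurd hc hne
    | cons a l =>
      intro hS
      have : a ∈ Sfin := by rw [hSdef, PySem.Set.mem_ofList, hc]; exact List.mem_cons_self
      rw [hS] at this
      simp at this
  set Dd : Int := (ddf cs : Int) with hDddef
  have hDdS : Dd = (Sfin.length : Int) := by
    rw [hDddef, ddf_eq_klist_length, hSdef]
    rw [← (klist_perm cs hlow).length_eq, List.length_map]
  have hDdpos : 0 < Dd := by
    rw [hDdS]
    cases hc : Sfin with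
    | nil => exact absurd hc hSne
    | cons a l => simp
  -- the minimum of the counter's values
  obtain ⟨m, hm⟩ : ∃ m, PySem.List.min? ((PySem.Dict.counter cs).values) (fun v => v) = some m := by
    cases hq : PySem.List.min? ((PySem.Dict.counter cs).values) (fun v => v) with
    | none =>
      rw [PySem.List.min?_eq_none_iff, hValues, List.map_eq_nil_iff] at hq
      exact absurd hq hSne
    | some m => exact ⟨m, rfl⟩
  have hmmem : ∃ c0 ∈ Sfin, m = (cs.count c0 : Int) := by
    have := PySem.List.min?_mem hm
    rw [hValues] at this
    obtain ⟨c0, hc0, hmc⟩ := List.mem_map.mp this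
    exact ⟨c0, hc0, hmc.symm⟩
  have hmmin : ∀ c0 ∈ Sfin, m ≤ (cs.count c0 : Int) := by
    intro c0 hc0
    have := PySem.List.min?_isMin hm ((cs.count c0 : Int)) ?_
    · exact this
    · rw [hValues]
      exact List.mem_map.mpr ⟨c0, hc0, rfl⟩
  -- Good t ↔ t ≤ m
  have hGm : ∀ t : Int, (∀ j, j < 26 → cntf cs j ≠ 0 → t ≤ cntf cs j) ↔ t ≤ m := by
    intro t
    constructor
    · intro hG
      obtain ⟨c0, hc0, rfl⟩ := hmmem
      have hc0cs : c0 ∈ cs := by rw [hSdef, PySem.Set.mem_ofList] at hc0; exact hc0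
      obtain ⟨h1, h2⟩ := hlow c0 hc0cs
      have hj26 : c0.toNat - 97 < 26 := by omega
      have hch : chrL (c0.toNat - 97) = c0 := (chrL_eq_iff hj26 h1).mpr rfl
      have hcnt : cntf cs (c0.toNat - 97) ≠ 0 := by
        rw [cntf, hch]
        have := List.count_pos_iff.mpr hc0cs
        omega
      have := hG _ hj26 hcnt
      rwa [cntf, hch] at this
    · intro htm j hj26 hcnt
      have hmem : chrL j ∈ cs := by
        rw [cntf] at hcnt
        exact List.count_pos_iff.mp (by omega)
      have := hmmin (chrL j) (by rw [hSdef, PySem.Set.mem_ofList]; exact hmem)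
      rw [cntf]
      omega
  set G : Int → Prop := fun t => ∀ j, j < 26 → cntf cs j ≠ 0 → t ≤ cntf cs j with hGdef
  set Pot : Int → List String :=
    fun t => (List.range 26).map (fun i => if !(cntf cs i == 0) then strf t i else "") with hPotdef
  have hInnerGood : ∀ t, G t →
      innerLoop cc t (PySem.List.pyRange 0 26 1) (true, 0, List.replicate 26 "")
        = (true, n - t * Dd, Pot t) := by
    intro t hG
    rw [inner_good cc t _ 0 (List.replicate 26 "") ?prem]
    case prem =>
      intro i hi
      obtain ⟨hi0, hi26⟩ := PySem.List.mem_pyRange_one.mp hi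
      obtain ⟨j, hj26, rfl⟩ : ∃ j : Nat, j < 26 ∧ i = (j : Int) :=
        ⟨i.toNat, by omega, by omega⟩
      rw [hg j hj26]
      exact hG j hj26
    simp only [Prod.mk.injEq]
    refine ⟨trivial, ?_, ?_⟩
    · -- the chars_to_remove sum
      show 0 + ((PySem.List.pyRange 0 26 1).map _).sum = n - t * Dd
      rw [PySem.List.pyRange_zero 26, List.map_map]
      have hmapeq : ((List.range (Int.toNat 26)).map
          ((fun i => if PySem.List.pyGetD cc i 0 ≠ 0 then PySem.List.pyGetD cc i 0 - t else 0)
            ∘ (fun k : Nat => (k : Int))))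
          = (List.range 26).map (fun j => if cntf cs j ≠ 0 then cntf cs j - t else 0) := by
        refine List.map_congr_left fun j hj => ?_
        have hj26 : j < 26 := by simpa using List.mem_range.mp hj
        simp only [Function.comp_apply, hg j hj26]
      rw [hmapeq, sum_ite_sub (cntf cs) t (List.range 26), sum_cnt cs hlow]
      have hcount : (List.range 26).countP (fun i => !(cntf cs i == 0)) = ddf cs := rfl
      rw [hcount]
      rw [hndef, hDddef]
      ring
    · -- the potential_result array
      show ((PySem.List.pyRange 0 26 1).foldl _ (List.replicate 26 "")) = Pot t
      rw [PySem.List.pyRange_zero 26, List.foldl_map]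
      have hbody : (fun (pt : List String) (j : Nat) =>
            if PySem.List.pyGetD cc ((j : Int)) 0 ≠ 0
            then PySem.List.pySetD pt ((j : Int))
              (String.ofList (List.replicate t.toNat (Char.ofNat (((j : Int)) + 97).toNat)))
            else pt)
          = (fun pt j => if (fun j : Nat => !(PySem.List.pyGetD cc ((j : Int)) 0 == 0)) j
              then PySem.List.pySetD pt ((j : Int))
                ((fun j : Nat => String.ofList (List.replicate t.toNat (Char.ofNat (((j : Int)) + 97).toNat))) j)
              else pt) := by
        funext pt j
        by_cases h : PySem.List.pyGetD cc ((j : Int)) 0 = 0 <;> simp [h]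
      rw [show (Int.toNat 26) = 26 from rfl, hbody,
        pot_fold _ _ (List.range 26) (List.replicate 26 "") (by simp)
          (fun j hj => List.mem_range.mp hj) (List.nodup_range)]
      refine List.map_congr_left fun j hj => ?_
      have hj26 : j < 26 := List.mem_range.mp hj
      have hcond : (!(PySem.List.pyGetD cc ((j : Int)) 0 == 0)) = (!(cntf cs j == 0)) := by
        rw [hg j hj26]
      have hv : String.ofList (List.replicate t.toNat (Char.ofNat (((j : Int)) + 97).toNat))
          = strf t j := by
        rw [strf, chrL, show (((j : Int)) + 97).toNat = 97 + j from by omega]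
      have hgetD : (List.replicate 26 "").getD j "" = "" := by
        rw [List.getD_eq_getElem _ _ (by simpa using hj26), List.getElem_replicate]
      rw [hgetD]
      by_cases h : (!(cntf cs j == 0)) = true
      · rw [if_pos ⟨hj, by rw [hcond]; exact h⟩, if_pos h, hv]
      · rw [if_neg (fun hc => h (by rw [← hcond]; exact hc.2)), if_neg h]
  have hInnerBad : ∀ t, ¬ G t →
      (innerLoop cc t (PySem.List.pyRange 0 26 1) (true, 0, List.replicate 26 "")).1 = false := by
    intro t hG
    refine inner_bad cc t _ 0 (List.replicate 26 "") ?_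
    have hex : ∃ j, j < 26 ∧ cntf cs j ≠ 0 ∧ cntf cs j < t := by
      by_contra hno
      push_neg at hno
      refine hG ?_
      rw [hGdef]
      intro j hj26 hcnt
      have := hno j hj26 hcnt
      omega
    obtain ⟨j, hj26, hcnt, hlt⟩ := hex
    refine ⟨(j : Int), PySem.List.mem_pyRange_one.mpr (by omega), ?_, ?_⟩
    · rw [hg j hj26]; exact hcnt
    · rw [hg j hj26]; exact hlt
  have hCnt : ∀ t : Int, 1 ≤ t →
      (Pot t).foldl (fun a c => if c ≠ "" then a + 1 else a) (0:Int) = Dd := by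
    intro t ht
    rw [PySem.List.foldl_ite_add_one (fun c => c ≠ "") (Pot t) 0, hPotdef]
    simp only [List.countP_map]
    have hcongr : ((List.range 26).countP ((fun x => decide (x ≠ ""))
          ∘ (fun i => if (!(cntf cs i == 0)) then strf t i else "")))
        = (List.range 26).countP (fun i => !(cntf cs i == 0)) := by
      refine List.countP_congr fun i hi => ?_
      by_cases h : (!(cntf cs i == 0)) = true
      · have hstr : strf t i ≠ "" := by
          refine ofList_ne_empty ?_
          simpa using (by omega : t.toNat ≠ 0)
        rw [Function.comp_apply, if_pos h, h]
        simp [hstr]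
      · rw [Function.comp_apply, if_neg h]
        simp only [ne_eq, not_true_eq_false, decide_false]
        simp at h
        simp [h]
    rw [hcongr]
    have : (List.range 26).countP (fun i => !(cntf cs i == 0)) = ddf cs := rfl
    rw [this, ← hDddef]
    ring
  have hStepId : ∀ (st : String × Int) (t : Int), ¬ (G t ∧ n - t * Dd = k) →
      outerStep cc k st t = st := by
    intro st t hng
    by_cases hG : G t
    · have htrig : ¬ (n - t * Dd = k) := fun h => hng ⟨hG, h⟩
      simp only [outerStep]
      rw [hInnerGood t hG]
      have hb : ((true && ((n - t * Dd) == k))) = false := by simp [htrig]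
      rw [hb]
      simp
    · have hbad := hInnerBad t hG
      rcases hres : innerLoop cc t (PySem.List.pyRange 0 26 1) (true, 0, List.replicate 26 "")
        with ⟨p, rm, pot⟩
      rw [hres] at hbad
      simp only at hbad
      simp only [outerStep]
      rw [hres, hbad]
      simp
  have hStepFire : ∀ t : Int, 1 ≤ t → G t → n - t * Dd = k →
      outerStep cc k ("", 0) t = (PySem.Str.join "" (Pot t), Dd) := by
    intro t ht hG htrig
    simp only [outerStep]
    rw [hInnerGood t hG]
    have hb : ((true && ((n - t * Dd) == k))) = true := by simp [htrig]
    rw [hb]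
    rw [hCnt t ht]
    simp [hDdpos]
  -- reduce both programs
  set ts := PySem.List.pyRange 1 (n + 1) 1 with htsdef
  have hAred : check s k = (ts.foldl (outerStep cc k) ("", 0)).1 := by
    simp only [check, hn]
    rw [if_neg (fun h => hnk (by rw [hn]; exact h)), ← hcs, hcc]
  set t0 := PySem.Int.floordiv (n - k) Dd with ht0def
  set r0 := PySem.Int.mod (n - k) Dd with hr0def
  have hBred : check_alt s k = (if r0 ≠ 0 ∨ m < t0 then ""
      else PySem.Str.join "" ((PySem.List.sorted Sfin (fun c => c)).map
        (fun ch => String.ofList (List.replicate t0.toNat ch)))) := by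
    simp only [check_alt, hn]
    rw [← hcs]
    rw [if_neg (by rintro (h | h); exacts [hnk (by rw [hn]; exact h), hne h])]
    rw [hcounter, hKeys, hm]
    have hsz : ((PySem.Dict.counter cs).size : Int) = Dd := by
      rw [hSize, ← hDdS]
    rw [hsz]
    rfl
  have hnk' : k < n := by
    by_contra hle
    exact hnk (by rw [hn]; omega)
  by_cases hcond : r0 ≠ 0 ∨ m < t0
  · -- no target count fires in A; B returns "" as well
    have hnotrig : ∀ t, ¬ (G t ∧ n - t * Dd = k) := by
      rintro t ⟨hG, htr⟩
      have hdvd : Dd ∣ (n - k) := ⟨t, by linarith⟩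
      have hr0 : r0 = 0 := by rw [hr0def, PySem.Int.mod_eq_zero_iff_dvd]; exact hdvd
      have ht0t : t0 = t := by
        rw [ht0def, show n - k = t * Dd from by linarith,
          PySem.Int.floordiv_eq_ediv_of_pos hDdpos, Int.mul_ediv_cancel _ (ne_of_gt hDdpos)]
      have htm : t ≤ m := (hGm t).mp hG
      rcases hcond with h | h
      · exact h hr0
      · rw [ht0t] at h; omega
    rw [hAred, foldl_id _ ts _ (fun t _ => hStepId _ t (hnotrig t)), hBred, if_pos hcond]
  · -- the unique target count t0 fires in A
    push_neg at hcond
    obtain ⟨hr0, htm⟩ := hcond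
    have hG0 : G t0 := (hGm t0).mpr htm
    have hmul : t0 * Dd = n - k := by
      have h := PySem.Int.floordiv_mul_add_mod (n - k) Dd
      rw [← hr0def, ← ht0def, hr0] at h
      linarith
    have htrig : n - t0 * Dd = k := by linarith
    have h1t0 : 1 ≤ t0 := by
      by_contra hle
      push_neg at hle
      have h0 : t0 ≤ 0 := by omega
      nlinarith
    have ht0n : t0 ≤ n := by
      obtain ⟨c0, hc0, hmeq⟩ := hmmem
      have hcn : (List.count c0 cs : Int) ≤ n := by
        rw [hndef]
        exact_mod_cast List.count_le_length
      omega
    have hmem : t0 ∈ ts := by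
      rw [htsdef]
      exact PySem.List.mem_pyRange_one.mpr ⟨h1t0, by omega⟩
    have hfold : ts.foldl (outerStep cc k) ("", 0) = outerStep cc k ("", 0) t0 := by
      refine foldl_single _ t0 ts _ hmem (htsdef ▸ PySem.List.nodup_pyRange_one 1 (n + 1)) ?_
      intro st t _ htne
      refine hStepId st t ?_
      rintro ⟨hG, htr⟩
      refine htne ?_
      have : t * Dd = t0 * Dd := by linarith
      exact mul_right_cancel₀ (ne_of_gt hDdpos) this
    rw [hAred, hfold, hStepFire t0 h1t0 hG0 htrig, hBred,
      if_neg (by push_neg; exact ⟨hr0, htm⟩)]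
    -- the two joined strings coincide
    refine String.toList_inj.mp ?_
    rw [PySem.Str.toList_join, PySem.Str.toList_join,
      show ("" : String).toList = [] from rfl, join_nil_eq_flatten, join_nil_eq_flatten]
    have hAside : (Pot t0).map String.toList
        = (List.range 26).map (fun i => if (!(cntf cs i == 0)) then List.replicate t0.toNat (chrL i) else []) := by
      rw [hPotdef]
      rw [List.map_map]
      refine List.map_congr_left fun i _ => ?_
      by_cases h : (!(cntf cs i == 0)) = true
      · simp only [Function.comp_apply, if_pos h, strf, String.toList_ofList]
      · simp only [Function.comp_apply, if_neg h]
        rfl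
    have hBside : (((PySem.List.sorted Sfin (fun c => c)).map
          (fun ch => String.ofList (List.replicate t0.toNat ch))).map String.toList)
        = (klist cs).map (fun i => List.replicate t0.toNat (chrL i)) := by
      rw [hSdef, sorted_keys cs hlow, List.map_map, List.map_map]
      refine List.map_congr_left fun i _ => ?_
      simp only [Function.comp_apply, String.toList_ofList]
    rw [hAside, hBside, flatten_map_ite (fun i => !(cntf cs i == 0))
      (fun i => List.replicate t0.toNat (chrL i)) (List.range 26)]
    rfl

theorem check_spec : Claim_equal_check := by
  intro s k _ hPre
  unfold Spec_check
  by_cases hnk : PySem.Str.len s ≤ k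
  · have hA : check s k = "" := by simp only [check, if_pos hnk]
    have hB : check_alt s k = "" := by simp only [check_alt, if_pos (Or.inl hnk)]
    rw [hA, hB]
  · have hlow : ∀ c ∈ s.toList, 97 ≤ c.toNat ∧ c.toNat ≤ 122 := by
      cases hPre with
      | inl h => exact absurd h hnk
      | inr h =>
        intro c hc
        have := List.all_eq_true.mp h c hc
        simp only [Bool.and_eq_true, decide_eq_true_eq] at this
        exact this
    by_cases hemp : s.toList = []
    · have hn : PySem.Str.len s = 0 := by simp [pysem, hemp]
      have hA : check s k = "" := by
        simp only [check, hn]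
        rw [if_neg (fun h => hnk (by rw [hn]; exact h)),
          PySem.List.pyRange_one_eq_nil (by norm_num)]
        rfl
      have hB : check_alt s k = "" := by
        simp only [check_alt, if_pos (Or.inr hemp)]
      rw [hA, hB]
    · exact main_nonempty s k hnk hlow hemp
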